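-- pv_equiv track=rewrite | github.com/k3yavi/LRA | source/RNAClustering.py | readStats
-- ===== SOURCE A (Python) =====
-- def readStats(reads):
--     """
--     Create a list of stats vectors for reads, each vector has the form:
--     (#A's, #C's, #G's, #T's, d(A's), d(C's), d(G's), d(T's), #switches, errors)
--
--         * # A's means the total number of A's in the read.
--         * d(A's) means the total distance in between A's.
--         * #switches means the total number of base alternations in a read.
--         * errors means the number of undefined 'N' bases in a read.
--
--     Note: With this information we can encode a read as a 10-tuple, so that
--     the manhattan/euclidean metrics can be used to measure closeness between
--     the properties encoded in the stats vector of any two reads.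
--
--     Input: list of reads.
--     Output: list of stats vectors corresponding to reads in the list of reads.
--     """
--     read_stats = []
--     for read in reads:
--         # initialize counters for each base (A, C, G, T)
--         count = {'A':0, 'C':0, 'G':0, 'T':0}
--         # 'A':[a, b]: a = distance in between A's, b = index of last 'A'
--         dist = {'A':[0, None], 'C':[0, None], 'G':[0, None], 'T':[0, None]}
--         num_switch = 0 # counter to keep track of alternation of bases
--         prev_base = ''
--         index = 0 # to indicate current's base index
--         errors = 0 # number of N's in the read
--         # loop through read's bases
--         for base in read:
--             # update number of switches
--             if base != prev_base:
--                 num_switch += 1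
--                 prev_base = base
--             # if an 'N' appears, we skip it
--             if base == 'N':
--                 index += 1
--                 errors += 1
--                 continue
--             # update number of bases
--             count[base] += 1
--             # update distance in between same bases
--             if dist[base][1] != None:
--                 dist[base][0] += index - dist[base][1] - 1
--             dist[base][1] = index
--             index += 1
--         read_stats.append((count['A'], count['C'], count['G'], count['T'],
--                         dist['A'][0], dist['C'][0], dist['G'][0], dist['T'][0],
--                         num_switch - 1, errors))
--     return read_stats
-- ===== SOURCE B (Python) =====
-- def readStats(reads):
--     out = []
--     for read in reads:
--         count = {'A': 0, 'C': 0, 'G': 0, 'T': 0, 'N': 0}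
--         first = {}
--         last = {}
--         for i, base in enumerate(read):
--             count[base] += 1
--             if base not in first:
--                 first[base] = i
--             last[base] = i
--         def d(b):
--             return last[b] - first[b] - count[b] + 1 if count[b] else 0
--         switches = (1 if read else 0) + sum(x != y for x, y in zip(read, read[1:])) - 1
--         out.append((count['A'], count['C'], count['G'], count['T'],
--                     d('A'), d('C'), d('G'), d('T'), switches, count['N']))
--     return out
-- ===== Notes on version B (the rewrite author's own statement) =====
-- stated objective: alternative
-- what changed: Replaces A's running inter-base gap accumulators and prev-base switch state by recording only first/last occurrence index and count per base (gap sum recovered by the closed form last - first - count + 1) and computing switches as a sum over adjacent pairs; unknown bases still raise KeyError at the same dict increment.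
import Mathlib
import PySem

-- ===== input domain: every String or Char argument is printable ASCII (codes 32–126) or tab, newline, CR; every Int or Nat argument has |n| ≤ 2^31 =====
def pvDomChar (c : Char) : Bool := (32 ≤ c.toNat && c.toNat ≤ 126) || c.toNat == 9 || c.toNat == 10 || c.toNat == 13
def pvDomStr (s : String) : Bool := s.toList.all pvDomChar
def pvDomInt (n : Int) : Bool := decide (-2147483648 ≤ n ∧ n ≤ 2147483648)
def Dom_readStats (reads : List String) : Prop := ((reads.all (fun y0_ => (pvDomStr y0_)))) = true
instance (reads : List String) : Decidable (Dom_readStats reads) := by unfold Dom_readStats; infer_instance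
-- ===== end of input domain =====

-- B replaces A's running inter-base gap accumulators and prev-base switch state by
-- per-base count/first/last dicts (gap sum = last - first - count + 1, a closed form)
-- and an adjacent-pairs sum for switches; objective: alternative decomposition,
-- equal return values on Pre_ (reads over the 'ACGTN' alphabet; both raise outside it).

-- ===== PORT A =====
-- Python A raises KeyError on a base outside 'ACGTN' (count[base]); Pre_readStats
-- excludes those inputs, so this port reads the dicts with getD (exact inside Pre_).
-- Python's prev_base = '' (a string never equal to a 1-char base) is ported as Option
-- Char with none for ''.
def aStep (st : PySem.Dict Char Int × PySem.Dict Char (Int × Option Int) × Int × Option Char × Int × Int)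
    (base : Char) : PySem.Dict Char Int × PySem.Dict Char (Int × Option Int) × Int × Option Char × Int × Int :=
  let (count, dist, numSwitch, prevBase, index, errors) := st
  let (numSwitch, prevBase) :=
    if some base ≠ prevBase then (numSwitch + 1, some base) else (numSwitch, prevBase)
  if base = 'N' then
    (count, dist, numSwitch, prevBase, index + 1, errors + 1)
  else
    let count := count.insert base (count.getD base 0 + 1)
    let dv := dist.getD base ((0 : Int), (none : Option Int))
    let dv : Int × Option Int :=
      match dv.2 with
      | some last => (dv.1 + (index - last - 1), some last)
      | none => dv
    let dist := dist.insert base (dv.1, some index)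
    (count, dist, numSwitch, prevBase, index + 1, errors)

def aRow (read : String) : Int × Int × Int × Int × Int × Int × Int × Int × Int × Int :=
  let st := read.toList.foldl aStep
    (PySem.Dict.ofList [('A', (0 : Int)), ('C', 0), ('G', 0), ('T', 0)],
     PySem.Dict.ofList [('A', ((0 : Int), (none : Option Int))), ('C', (0, none)), ('G', (0, none)), ('T', (0, none))],
     0, none, 0, 0)
  let (count, dist, numSwitch, _, _, errors) := st
  (count.getD 'A' 0, count.getD 'C' 0, count.getD 'G' 0, count.getD 'T' 0,
   (dist.getD 'A' (0, none)).1, (dist.getD 'C' (0, none)).1,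
   (dist.getD 'G' (0, none)).1, (dist.getD 'T' (0, none)).1,
   numSwitch - 1, errors)

def readStats (reads : List String) : List (Int × Int × Int × Int × Int × Int × Int × Int × Int × Int) :=
  reads.foldl (fun readStatsAcc read => readStatsAcc ++ [aRow read]) []

-- ===== PORT B =====
-- Python B raises KeyError at count[base] for a base outside 'ACGTN', exactly like A;
-- the port reads the count dict with getD (exact inside Pre_).
def bStep (st : PySem.Dict Char Int × PySem.Dict Char Int × PySem.Dict Char Int)
    (p : Int × Char) : PySem.Dict Char Int × PySem.Dict Char Int × PySem.Dict Char Int :=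
  let (count, first, last) := st
  let (i, base) := p
  (count.insert base (count.getD base 0 + 1),
   if first.contains base then first else first.insert base i,
   last.insert base i)

def bRow (read : String) : Int × Int × Int × Int × Int × Int × Int × Int × Int × Int :=
  let xs := read.toList
  let st := (PySem.List.enumerate xs 0).foldl bStep
    (PySem.Dict.ofList [('A', (0 : Int)), ('C', 0), ('G', 0), ('T', 0), ('N', 0)],
     PySem.Dict.empty, PySem.Dict.empty)
  let (count, first, last) := st
  let d : Char → Int := fun b =>
    if count.getD b 0 ≠ 0 then last.getD b 0 - first.getD b 0 - count.getD b 0 + 1 else 0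
  let switches : Int := (if xs.isEmpty then 0 else 1)
    + ((xs.zip xs.tail).map (fun p => if p.1 ≠ p.2 then (1 : Int) else 0)).sum - 1
  (count.getD 'A' 0, count.getD 'C' 0, count.getD 'G' 0, count.getD 'T' 0,
   d 'A', d 'C', d 'G', d 'T', switches, count.getD 'N' 0)

def readStats_alt (reads : List String) : List (Int × Int × Int × Int × Int × Int × Int × Int × Int × Int) :=
  reads.foldl (fun out read => out ++ [bRow read]) []

-- ===== PRECONDITION & SPEC =====
-- Pre_ excludes exactly the reads containing a character outside 'ACGTN': on those both
-- Python A and Python B raise KeyError instead of returning.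
def Pre_readStats (reads : List String) : Prop :=
  (reads.all (fun s => s.toList.all (fun c => (['A', 'C', 'G', 'T', 'N'] : List Char).contains c))) = true
instance (reads : List String) : Decidable (Pre_readStats reads) := by unfold Pre_readStats; infer_instance

def pvWitness_readStats : List String := ["ACGTN", "", "AANCA"]

def Spec_readStats (reads : List String) (out : List (Int × Int × Int × Int × Int × Int × Int × Int × Int × Int)) : Prop := out = readStats_alt reads
instance (reads : List String) (out : List (Int × Int × Int × Int × Int × Int × Int × Int × Int × Int)) : Decidable (Spec_readStats reads out) := by
  unfold Spec_readStats
  haveI h5 : DecidableEq (Int × Int × Int × Int × Int) := inferInstance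
  infer_instance

-- ===== CLAIM =====
def Claim_equal_readStats : Prop := ∀ (reads : List String), Dom_readStats reads → Pre_readStats reads → Spec_readStats reads (readStats reads)

-- ===== LEMMAS AND PROOFS =====

-- indices of the occurrences of b in xs
def bIdxs (xs : List Char) (b : Char) : List Int :=
  (PySem.List.enumerate xs 0).filterMap (fun p => if p.2 = b then some p.1 else none)

-- the switch count in adjacent-pairs form
def swS (xs : List Char) : Int :=
  (if xs.isEmpty then 0 else 1) + ((xs.zip xs.tail).map (fun p => if p.1 ≠ p.2 then (1 : Int) else 0)).sum

-- A's dist[b] entry (gap sum, last index) in terms of the occurrence-index list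
def dd (xs : List Char) (b : Char) : Int × Option Int :=
  match bIdxs xs b with
  | [] => (0, none)
  | f :: rest => (rest.getLastD f - f - ((rest.length : Nat) : Int), some (rest.getLastD f))

lemma bIdxs_append (xs : List Char) (c b : Char) :
    bIdxs (xs ++ [c]) b = bIdxs xs b ++ (if c = b then [((xs.length : Nat) : Int)] else []) := by
  simp [bIdxs, PySem.List.enumerate_append, PySem.List.enumerate_cons, PySem.List.enumerate_nil]
  split_ifs <;> simp_all

lemma bIdxs_length (xs : List Char) (b : Char) :
    ((bIdxs xs b).length : Int) = ((xs.count b : Nat) : Int) := by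
  induction xs using List.reverseRecOn with
  | nil => simp [bIdxs, PySem.List.enumerate_nil]
  | append_singleton xs c ih =>
    rw [bIdxs_append, List.count_append]
    by_cases h : c = b <;> simp [h, ih] <;> omega

lemma swS_head (x y : Char) (ys : List Char) :
    swS (x :: y :: ys) = swS (y :: ys) + (if x ≠ y then 1 else 0) := by
  simp [swS]; ring

lemma swS_append (xs : List Char) (c : Char) :
    swS (xs ++ [c]) = swS xs + (if some c ≠ xs.getLast? then 1 else 0) := by
  induction xs with
  | nil => simp [swS]
  | cons x xs ih =>
    cases xs with
    | nil =>
      by_cases h : x = c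
      · simp [swS, h]
      · have h' : ¬ c = x := fun e => h e.symm
        simp [swS, h, h']
    | cons y ys =>
      have h1 := swS_head x y (ys ++ [c])
      have h2 := swS_head x y ys
      simp only [List.cons_append] at *
      rw [h1, ih, List.getLast?_cons_cons, h2]
      ring

lemma inner_inv (xs : List Char) :
    (∀ b : Char, b ≠ 'N' →
        (xs.foldl aStep
          (PySem.Dict.ofList [('A', (0 : Int)), ('C', 0), ('G', 0), ('T', 0)],
           PySem.Dict.ofList [('A', ((0 : Int), (none : Option Int))), ('C', (0, none)), ('G', (0, none)), ('T', (0, none))],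
           0, none, 0, 0)).1.getD b 0 = ((bIdxs xs b).length : Int))
    ∧ (∀ b : Char, b ≠ 'N' →
        (xs.foldl aStep
          (PySem.Dict.ofList [('A', (0 : Int)), ('C', 0), ('G', 0), ('T', 0)],
           PySem.Dict.ofList [('A', ((0 : Int), (none : Option Int))), ('C', (0, none)), ('G', (0, none)), ('T', (0, none))],
           0, none, 0, 0)).2.1.getD b (0, none) = dd xs b)
    ∧ (xs.foldl aStep
          (PySem.Dict.ofList [('A', (0 : Int)), ('C', 0), ('G', 0), ('T', 0)],
           PySem.Dict.ofList [('A', ((0 : Int), (none : Option Int))), ('C', (0, none)), ('G', (0, none)), ('T', (0, none))],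
           0, none, 0, 0)).2.2 = (swS xs, xs.getLast?, ((xs.length : Nat) : Int), ((xs.count 'N' : Nat) : Int)) := by
  induction xs using List.reverseRecOn with
  | nil =>
    refine ⟨?_, ?_, ?_⟩
    · intro b hb
      simp [bIdxs, PySem.List.enumerate_nil, PySem.Dict.getD_eq_get?_getD,
        PySem.Dict.ofList, PySem.Dict.update, PySem.Dict.get?_insert, PySem.Dict.empty]
      split_ifs <;> rfl
    · intro b hb
      simp [dd, bIdxs, PySem.List.enumerate_nil, PySem.Dict.getD_eq_get?_getD,
        PySem.Dict.ofList, PySem.Dict.update, PySem.Dict.get?_insert, PySem.Dict.empty]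
      split_ifs <;> rfl
    · simp [swS]
  | append_singleton xs c ih =>
    obtain ⟨ih1, ih2, ih3⟩ := ih
    have hst : xs.foldl aStep
          (PySem.Dict.ofList [('A', (0 : Int)), ('C', 0), ('G', 0), ('T', 0)],
           PySem.Dict.ofList [('A', ((0 : Int), (none : Option Int))), ('C', (0, none)), ('G', (0, none)), ('T', (0, none))],
           0, none, 0, 0)
        = ((xs.foldl aStep
          (PySem.Dict.ofList [('A', (0 : Int)), ('C', 0), ('G', 0), ('T', 0)],
           PySem.Dict.ofList [('A', ((0 : Int), (none : Option Int))), ('C', (0, none)), ('G', (0, none)), ('T', (0, none))],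
           0, none, 0, 0)).1,
           (xs.foldl aStep
          (PySem.Dict.ofList [('A', (0 : Int)), ('C', 0), ('G', 0), ('T', 0)],
           PySem.Dict.ofList [('A', ((0 : Int), (none : Option Int))), ('C', (0, none)), ('G', (0, none)), ('T', (0, none))],
           0, none, 0, 0)).2.1,
           swS xs, xs.getLast?, ((xs.length : Nat) : Int), ((xs.count 'N' : Nat) : Int)) := by
      rw [← ih3]
    rw [List.foldl_append, hst]
    by_cases hc : c = 'N'
    · subst hc
      refine ⟨?_, ?_, ?_⟩
      · intro b hb
        have hne : ¬ ('N' = b) := fun e => hb e.symm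
        simp only [aStep, List.foldl_cons, List.foldl_nil]
        simp [bIdxs_append, hne, ih1 b hb]
      · intro b hb
        have hne : ¬ ('N' = b) := fun e => hb e.symm
        have hbi : bIdxs (xs ++ ['N']) b = bIdxs xs b := by
          rw [bIdxs_append]; simp [hne]
        have hdd : dd (xs ++ ['N']) b = dd xs b := by unfold dd; rw [hbi]
        simp [aStep, hdd, ih2 b hb]
      · rw [swS_append]
        by_cases hp : some 'N' = xs.getLast? <;>
          simp [aStep, hp, List.getLast?_concat, List.count_append]
    · refine ⟨?_, ?_, ?_⟩
      · intro b hb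
        by_cases hbc : b = c
        · subst hbc
          simp [aStep, hc, PySem.Dict.getD_insert, ih1 b hb, bIdxs_append]
        · have hcb : ¬ (c = b) := fun e => hbc e.symm
          simp [aStep, hc, PySem.Dict.getD_insert, hbc, hcb, ih1 b hb, bIdxs_append]
      · intro b hb
        by_cases hbc : b = c
        · subst hbc
          have h2 := ih2 b hb
          cases hL : bIdxs xs b with
          | nil =>
            have hL2 : bIdxs (xs ++ [b]) b = [((xs.length : Nat) : Int)] := by
              rw [bIdxs_append]; simp [hL]
            simp [aStep, hc, PySem.Dict.getD_insert, h2, dd, hL, hL2]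
          | cons f rest =>
            have hL2 : bIdxs (xs ++ [b]) b = f :: (rest ++ [((xs.length : Nat) : Int)]) := by
              rw [bIdxs_append]; simp [hL]
            simp [aStep, hc, PySem.Dict.getD_insert, h2, dd, hL, hL2, List.getLastD_concat]
            omega
        · have hcb : ¬ (c = b) := fun e => hbc e.symm
          have hbi : bIdxs (xs ++ [c]) b = bIdxs xs b := by
            rw [bIdxs_append]; simp [hcb]
          have hdd : dd (xs ++ [c]) b = dd xs b := by unfold dd; rw [hbi]
          simp [aStep, hc, PySem.Dict.getD_insert, hbc, hdd, ih2 b hb]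
      · rw [swS_append]
        by_cases hp : some c = xs.getLast? <;>
          simp [aStep, hc, hp, List.getLast?_concat, List.count_append] <;> omega

-- B's loop invariant: count / first / last in terms of the occurrence-index list
lemma b_inv (xs : List Char) :
    (∀ b : Char,
        ((PySem.List.enumerate xs 0).foldl bStep
          (PySem.Dict.ofList [('A', (0 : Int)), ('C', 0), ('G', 0), ('T', 0), ('N', 0)],
           PySem.Dict.empty, PySem.Dict.empty)).1.getD b 0 = ((bIdxs xs b).length : Int))
    ∧ (∀ b : Char,
        ((PySem.List.enumerate xs 0).foldl bStep
          (PySem.Dict.ofList [('A', (0 : Int)), ('C', 0), ('G', 0), ('T', 0), ('N', 0)],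
           PySem.Dict.empty, PySem.Dict.empty)).2.1.get? b = (bIdxs xs b).head?)
    ∧ (∀ b : Char,
        ((PySem.List.enumerate xs 0).foldl bStep
          (PySem.Dict.ofList [('A', (0 : Int)), ('C', 0), ('G', 0), ('T', 0), ('N', 0)],
           PySem.Dict.empty, PySem.Dict.empty)).2.2.get? b = (bIdxs xs b).getLast?) := by
  induction xs using List.reverseRecOn with
  | nil =>
    refine ⟨?_, ?_, ?_⟩
    · intro b
      simp [bIdxs, PySem.List.enumerate_nil, PySem.Dict.getD_eq_get?_getD,
        PySem.Dict.ofList, PySem.Dict.update, PySem.Dict.get?_insert, PySem.Dict.empty]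
      split_ifs <;> rfl
    · intro b; simp [bIdxs, PySem.List.enumerate_nil, PySem.Dict.get?_empty]
    · intro b; simp [bIdxs, PySem.List.enumerate_nil, PySem.Dict.get?_empty]
  | append_singleton xs c ih =>
    obtain ⟨ih1, ih2, ih3⟩ := ih
    have hen : PySem.List.enumerate (xs ++ [c]) 0
        = PySem.List.enumerate xs 0 ++ [(((xs.length : Nat) : Int), c)] := by
      rw [PySem.List.enumerate_append]
      simp [PySem.List.enumerate_cons, PySem.List.enumerate_nil]
    rw [hen, List.foldl_append]
    refine ⟨?_, ?_, ?_⟩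
    · intro b
      by_cases hbc : b = c
      · subst hbc
        simp [bStep, PySem.Dict.getD_insert, ih1 b, bIdxs_append]
      · have hcb : ¬ (c = b) := fun e => hbc e.symm
        simp [bStep, PySem.Dict.getD_insert, hbc, hcb, ih1 b, bIdxs_append]
    · intro b
      by_cases hbc : b = c
      · subst hbc
        rw [bIdxs_append]
        simp only [bStep, List.foldl_cons, List.foldl_nil]
        by_cases hco : ((PySem.List.enumerate xs 0).foldl bStep
            (PySem.Dict.ofList [('A', (0 : Int)), ('C', 0), ('G', 0), ('T', 0), ('N', 0)],
             PySem.Dict.empty, PySem.Dict.empty)).2.1.contains b = true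
        · have hsome : ((bIdxs xs b).head?).isSome := by
            rw [← ih2 b, ← PySem.Dict.contains_eq_isSome_get?]; exact hco
          cases hL : bIdxs xs b with
          | nil => rw [hL] at hsome; simp at hsome
          | cons f rest => simp [hco, ih2 b, hL]
        · have hnone : (bIdxs xs b).head? = none := by
            rw [← ih2 b]
            have := PySem.Dict.contains_eq_isSome_get?
              (d := ((PySem.List.enumerate xs 0).foldl bStep
                (PySem.Dict.ofList [('A', (0 : Int)), ('C', 0), ('G', 0), ('T', 0), ('N', 0)],
                 PySem.Dict.empty, PySem.Dict.empty)).2.1) (k := b)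
            cases hg : ((PySem.List.enumerate xs 0).foldl bStep
                (PySem.Dict.ofList [('A', (0 : Int)), ('C', 0), ('G', 0), ('T', 0), ('N', 0)],
                 PySem.Dict.empty, PySem.Dict.empty)).2.1.get? b with
            | none => rfl
            | some v => rw [hg] at this; simp [this] at hco
          have hL : bIdxs xs b = [] := by
            cases hL : bIdxs xs b with
            | nil => rfl
            | cons f rest => rw [hL] at hnone; simp at hnone
          simp [hco, hL, PySem.Dict.get?_insert]
      · have hcb : ¬ (c = b) := fun e => hbc e.symm
        have hbi : bIdxs (xs ++ [c]) b = bIdxs xs b := by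
          rw [bIdxs_append]; simp [hcb]
        rw [hbi]
        simp only [bStep, List.foldl_cons, List.foldl_nil]
        split_ifs with h
        · exact ih2 b
        · rw [PySem.Dict.get?_insert]; simp [hbc, ih2 b]
    · intro b
      by_cases hbc : b = c
      · subst hbc
        have hbi : bIdxs (xs ++ [b]) b = bIdxs xs b ++ [((xs.length : Nat) : Int)] := by
          rw [bIdxs_append]; simp
        simp [bStep, PySem.Dict.get?_insert, hbi]
      · have hcb : ¬ (c = b) := fun e => hbc e.symm
        have hbi : bIdxs (xs ++ [c]) b = bIdxs xs b := by
          rw [bIdxs_append]; simp [hcb]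
        simp [bStep, PySem.Dict.get?_insert, hbc, hbi, ih3 b]

lemma b_d_eq_dd (xs : List Char) (b : Char) :
    (if ((PySem.List.enumerate xs 0).foldl bStep
          (PySem.Dict.ofList [('A', (0 : Int)), ('C', 0), ('G', 0), ('T', 0), ('N', 0)],
           PySem.Dict.empty, PySem.Dict.empty)).1.getD b 0 ≠ 0 then
        ((PySem.List.enumerate xs 0).foldl bStep
          (PySem.Dict.ofList [('A', (0 : Int)), ('C', 0), ('G', 0), ('T', 0), ('N', 0)],
           PySem.Dict.empty, PySem.Dict.empty)).2.2.getD b 0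
        - ((PySem.List.enumerate xs 0).foldl bStep
          (PySem.Dict.ofList [('A', (0 : Int)), ('C', 0), ('G', 0), ('T', 0), ('N', 0)],
           PySem.Dict.empty, PySem.Dict.empty)).2.1.getD b 0
        - ((PySem.List.enumerate xs 0).foldl bStep
          (PySem.Dict.ofList [('A', (0 : Int)), ('C', 0), ('G', 0), ('T', 0), ('N', 0)],
           PySem.Dict.empty, PySem.Dict.empty)).1.getD b 0 + 1
      else 0) = (dd xs b).1 := by
  obtain ⟨h1, h2, h3⟩ := b_inv xs
  rw [h1 b]
  cases hL : bIdxs xs b with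
  | nil => simp [dd, hL]
  | cons f rest =>
    have hhead : (bIdxs xs b).head? = some f := by rw [hL]; rfl
    have hlast : (bIdxs xs b).getLast? = some (rest.getLastD f) := by
      rw [hL]
      cases rest with
      | nil => rfl
      | cons r rs => simp [List.getLast?_eq_getLast, List.getLast_eq_getLastD]
    have hf : ((PySem.List.enumerate xs 0).foldl bStep
          (PySem.Dict.ofList [('A', (0 : Int)), ('C', 0), ('G', 0), ('T', 0), ('N', 0)],
           PySem.Dict.empty, PySem.Dict.empty)).2.1.getD b 0 = f := by
      rw [PySem.Dict.getD_eq_get?_getD, h2 b, hhead]; rfl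
    have hl : ((PySem.List.enumerate xs 0).foldl bStep
          (PySem.Dict.ofList [('A', (0 : Int)), ('C', 0), ('G', 0), ('T', 0), ('N', 0)],
           PySem.Dict.empty, PySem.Dict.empty)).2.2.getD b 0 = rest.getLastD f := by
      rw [PySem.Dict.getD_eq_get?_getD, h3 b, hlast]; rfl
    have hne : ((rest.length + 1 : Nat) : Int) ≠ 0 := by positivity
    simp only [hL, List.length_cons, hf, hl, dd, hne, if_pos, ne_eq, not_false_iff]
    push_cast
    omega

lemma row_eq (read : String) : aRow read = bRow read := by
  obtain ⟨ha1, ha2, ha3⟩ := inner_inv read.toList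
  obtain ⟨hb1, hb2, hb3⟩ := b_inv read.toList
  simp only [aRow, bRow]
  refine Prod.ext ?_ (Prod.ext ?_ (Prod.ext ?_ (Prod.ext ?_ (Prod.ext ?_ (Prod.ext ?_
    (Prod.ext ?_ (Prod.ext ?_ (Prod.ext ?_ ?_))))))))
  · rw [ha1 'A' (by decide), hb1 'A']
  · rw [ha1 'C' (by decide), hb1 'C']
  · rw [ha1 'G' (by decide), hb1 'G']
  · rw [ha1 'T' (by decide), hb1 'T']
  · rw [ha2 'A' (by decide)]; exact (b_d_eq_dd read.toList 'A').symm
  · rw [ha2 'C' (by decide)]; exact (b_d_eq_dd read.toList 'C').symm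
  · rw [ha2 'G' (by decide)]; exact (b_d_eq_dd read.toList 'G').symm
  · rw [ha2 'T' (by decide)]; exact (b_d_eq_dd read.toList 'T').symm
  · simp only [ha3]; simp [swS]
  · simp only [ha3, hb1 'N', bIdxs_length]

-- ===== VERDICT =====
theorem readStats_spec : Claim_equal_readStats := by
  intro reads _ _
  unfold Spec_readStats readStats readStats_alt
  simp [pysem, ← List.flatMap_def, ← List.map_eq_flatMap]
  exact fun r _ => row_eq r
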